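-- pv_equiv track=rewrite | github.com/ram-prasad-sahoo/astrava | modules/chain_attacks.py | get_chain_prerequisites
-- ===== SOURCE A (Python) =====
-- from typing import Dict, List, Any, Optional, Tuple
--
-- def get_chain_prerequisites(vulnerabilities: List[Dict[str, Any]]) -> List[str]:
--     """Get prerequisites for executing the attack chain"""
--
--     prerequisites = []
--
--     # Network access
--     prerequisites.append("Network access to target application")
--
--     # Check for authentication requirements
--     if any('auth' in v.get('description', '').lower() for v in vulnerabilities):
--         prerequisites.append("Valid user credentials or session")
--
--     # Check for specific tools needed
--     vuln_types = [v.get('type', '').lower() for v in vulnerabilities]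
--
--     if any('sql injection' in vt for vt in vuln_types):
--         prerequisites.append("SQL injection tools (sqlmap, custom scripts)")
--
--     if any('xss' in vt for vt in vuln_types):
--         prerequisites.append("XSS payload delivery mechanism")
--
--     if any('command injection' in vt for vt in vuln_types):
--         prerequisites.append("Command execution payloads")
--
--     if any('file upload' in vt for vt in vuln_types):
--         prerequisites.append("Malicious file preparation")
--
--     # User interaction requirements
--     if any('xss' in vt for vt in vuln_types):
--         prerequisites.append("Target user interaction (for XSS)")
--
--     return prerequisites
-- ===== SOURCE B (Python) =====
-- from typing import Dict, List, Any, Optional, Tuple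
--
-- def get_chain_prerequisites(vulnerabilities: List[Dict[str, Any]]) -> List[str]:
--     """Get prerequisites for executing the attack chain (single-pass flag version)"""
--     needs_auth = has_sql = has_xss = has_cmd = has_upload = False
--     for v in vulnerabilities:
--         t = v.get('type', '').lower()
--         needs_auth = needs_auth or 'auth' in v.get('description', '').lower()
--         has_sql = has_sql or 'sql injection' in t
--         has_xss = has_xss or 'xss' in t
--         has_cmd = has_cmd or 'command injection' in t
--         has_upload = has_upload or 'file upload' in t
--     return (["Network access to target application"]
--             + (["Valid user credentials or session"] if needs_auth else [])
--             + (["SQL injection tools (sqlmap, custom scripts)"] if has_sql else [])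
--             + (["XSS payload delivery mechanism"] if has_xss else [])
--             + (["Command execution payloads"] if has_cmd else [])
--             + (["Malicious file preparation"] if has_upload else [])
--             + (["Target user interaction (for XSS)"] if has_xss else []))
-- ===== Notes on version B (the rewrite author's own statement) =====
-- stated objective: simpler
-- what changed: Replaced six separate any-scans (plus an intermediate vuln_types list) and incremental list appends with a single pass that accumulates five boolean flags, then builds the result as one concatenation of conditional segments.
import Mathlib
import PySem

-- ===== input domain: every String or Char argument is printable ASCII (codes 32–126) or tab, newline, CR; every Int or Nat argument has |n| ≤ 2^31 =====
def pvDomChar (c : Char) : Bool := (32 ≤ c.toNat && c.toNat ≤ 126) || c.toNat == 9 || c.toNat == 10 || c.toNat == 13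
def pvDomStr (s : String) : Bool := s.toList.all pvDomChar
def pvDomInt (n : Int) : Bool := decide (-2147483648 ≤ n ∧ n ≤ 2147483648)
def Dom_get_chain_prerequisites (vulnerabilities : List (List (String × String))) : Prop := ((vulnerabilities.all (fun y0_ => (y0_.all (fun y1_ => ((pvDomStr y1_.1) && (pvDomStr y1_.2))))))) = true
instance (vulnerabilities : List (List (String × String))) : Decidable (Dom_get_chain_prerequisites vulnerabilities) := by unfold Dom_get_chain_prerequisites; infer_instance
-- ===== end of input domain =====

-- B replaces A's six any-scans with a single flag-accumulating pass; objective: simpler (same return value).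
-- ===== PORT A =====
def get_chain_prerequisites (vulnerabilities : List (List (String × String))) : List String :=
  let prerequisites : List String := []
  let prerequisites := prerequisites ++ ["Network access to target application"]
  let prerequisites :=
    if vulnerabilities.any (fun v =>
        PySem.Str.isIn "auth" (PySem.Str.lower ((PySem.Dict.mk v).getD "description" ""))) then
      prerequisites ++ ["Valid user credentials or session"]
    else prerequisites
  let vuln_types := vulnerabilities.map (fun v => PySem.Str.lower ((PySem.Dict.mk v).getD "type" ""))
  let prerequisites :=
    if vuln_types.any (fun vt => PySem.Str.isIn "sql injection" vt) then
      prerequisites ++ ["SQL injection tools (sqlmap, custom scripts)"]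
    else prerequisites
  let prerequisites :=
    if vuln_types.any (fun vt => PySem.Str.isIn "xss" vt) then
      prerequisites ++ ["XSS payload delivery mechanism"]
    else prerequisites
  let prerequisites :=
    if vuln_types.any (fun vt => PySem.Str.isIn "command injection" vt) then
      prerequisites ++ ["Command execution payloads"]
    else prerequisites
  let prerequisites :=
    if vuln_types.any (fun vt => PySem.Str.isIn "file upload" vt) then
      prerequisites ++ ["Malicious file preparation"]
    else prerequisites
  let prerequisites :=
    if vuln_types.any (fun vt => PySem.Str.isIn "xss" vt) then
      prerequisites ++ ["Target user interaction (for XSS)"]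
    else prerequisites
  prerequisites

-- ===== PORT B =====
def get_chain_prerequisites_alt (vulnerabilities : List (List (String × String))) : List String :=
  let flags := vulnerabilities.foldl
    (fun (f : Bool × Bool × Bool × Bool × Bool) v =>
      let t := PySem.Str.lower ((PySem.Dict.mk v).getD "type" "")
      (f.1 || PySem.Str.isIn "auth" (PySem.Str.lower ((PySem.Dict.mk v).getD "description" "")),
       f.2.1 || PySem.Str.isIn "sql injection" t,
       f.2.2.1 || PySem.Str.isIn "xss" t,
       f.2.2.2.1 || PySem.Str.isIn "command injection" t,
       f.2.2.2.2 || PySem.Str.isIn "file upload" t))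
    (false, false, false, false, false)
  ["Network access to target application"]
    ++ (if flags.1 then ["Valid user credentials or session"] else [])
    ++ (if flags.2.1 then ["SQL injection tools (sqlmap, custom scripts)"] else [])
    ++ (if flags.2.2.1 then ["XSS payload delivery mechanism"] else [])
    ++ (if flags.2.2.2.1 then ["Command execution payloads"] else [])
    ++ (if flags.2.2.2.2 then ["Malicious file preparation"] else [])
    ++ (if flags.2.2.1 then ["Target user interaction (for XSS)"] else [])

-- ===== PRECONDITION & SPEC =====
def Spec_get_chain_prerequisites (vulnerabilities : List (List (String × String))) (out : List String) : Prop := out = get_chain_prerequisites_alt vulnerabilities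
instance (vulnerabilities : List (List (String × String))) (out : List String) : Decidable (Spec_get_chain_prerequisites vulnerabilities out) := by unfold Spec_get_chain_prerequisites; infer_instance

-- ===== CLAIM (what is proved, stated in full; the proofs are below) =====
def Claim_equal_get_chain_prerequisites : Prop := ∀ (vulnerabilities : List (List (String × String))), Dom_get_chain_prerequisites vulnerabilities → Spec_get_chain_prerequisites vulnerabilities (get_chain_prerequisites vulnerabilities)

-- ===== LEMMAS AND PROOFS =====

-- The five-flag fold computes the five `any` scans componentwise.
theorem flags_eq (p q r s t : List (String × String) → Bool)
    (l : List (List (String × String))) (a b c d e : Bool) :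
    l.foldl (fun (f : Bool × Bool × Bool × Bool × Bool) v =>
        (f.1 || p v, f.2.1 || q v, f.2.2.1 || r v, f.2.2.2.1 || s v, f.2.2.2.2 || t v))
      (a, b, c, d, e)
    = (a || l.any p, b || l.any q, c || l.any r, d || l.any s, e || l.any t) := by
  induction l generalizing a b c d e with
  | nil => simp
  | cons x xs ih =>
    simp [List.foldl_cons, ih, Bool.or_assoc]

-- ===== VERDICT (by name: the statement is the Claim_ definition above) =====
theorem get_chain_prerequisites_spec : Claim_equal_get_chain_prerequisites := by
  intro vs _
  show get_chain_prerequisites vs = get_chain_prerequisites_alt vs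
  unfold get_chain_prerequisites get_chain_prerequisites_alt
  rw [flags_eq]
  simp only [List.any_map, Bool.false_or, Function.comp_def]
  split_ifs <;> simp
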